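-- pv_equiv track=rewrite | github.com/r-dion/MTI | evalpack/utils/affiliation_utils.py | convert_vector_to_events
-- ===== SOURCE A (Python) =====
-- from itertools import groupby
-- from operator import itemgetter
--
-- def convert_vector_to_events(vector=[0, 1, 1, 0, 0, 1, 0]):
--     """
--     Convert a binary vector (indicating 1 for the anomalous instances)
--     to a list of events. The events are considered as durations,
--     i.e. setting 1 at index i corresponds to an anomalous interval [i, i+1).
--
--     :param vector: a list of elements belonging to {0, 1}
--     :return: a list of couples, each couple representing the start and stop of
--     each event
--     """
--     positive_indexes = [idx for idx, val in enumerate(vector) if val > 0]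
--     events = []
--     for k, g in groupby(enumerate(positive_indexes), lambda ix: ix[0] - ix[1]):
--         cur_cut = list(map(itemgetter(1), g))
--         events.append((cur_cut[0], cur_cut[-1]))
--
--     # Consistent conversion in case of range anomalies (for indexes):
--     # A positive index i is considered as the interval [i, i+1),
--     # so the last index should be moved by 1
--     events = [(x, y + 1) for (x, y) in events]
--
--     return events
-- ===== SOURCE B (Python) =====
-- def convert_vector_to_events(vector=[0, 1, 1, 0, 0, 1, 0]):
--     """Single pass with an in_run flag; no enumerate-of-indexes/groupby machinery."""
--     events = []
--     in_run = False
--     start = 0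
--     for i, val in enumerate(vector):
--         if val > 0:
--             if not in_run:
--                 start = i
--                 in_run = True
--         elif in_run:
--             events.append((start, i))
--             in_run = False
--     if in_run:
--         events.append((start, len(vector)))
--     return events
-- ===== Notes on version B (the rewrite author's own statement) =====
-- stated objective: simpler
-- what changed: Replaces the enumerate/filter + itertools.groupby-on-index-difference pipeline (plus a final +1 remapping pass) with one direct pass that tracks an in_run flag and a run start and emits each half-open interval as the run ends.
import Mathlib
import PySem

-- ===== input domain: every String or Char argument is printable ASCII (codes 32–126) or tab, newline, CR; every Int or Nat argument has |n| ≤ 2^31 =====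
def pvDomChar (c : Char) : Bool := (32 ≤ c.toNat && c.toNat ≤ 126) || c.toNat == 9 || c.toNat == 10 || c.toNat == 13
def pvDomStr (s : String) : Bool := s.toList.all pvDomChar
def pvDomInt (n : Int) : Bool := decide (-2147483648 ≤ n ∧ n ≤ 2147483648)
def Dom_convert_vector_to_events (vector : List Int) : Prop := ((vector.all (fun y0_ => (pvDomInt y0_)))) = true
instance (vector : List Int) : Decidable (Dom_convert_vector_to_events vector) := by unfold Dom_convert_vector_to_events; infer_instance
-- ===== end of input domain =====

-- B replaces A's enumerate/filter + groupby-on-index-difference pipeline (and final +1 pass)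
-- by a single direct pass with an in_run flag; objective: simpler.


-- ===== PORT A =====
-- itertools.groupby: chop a list into maximal consecutive runs of equal key (groups kept in order).
def pvGroupBy (key : Int × Int → Int) : List (Int × Int) → List (List (Int × Int))
  | [] => []
  | x :: xs =>
    match pvGroupBy key xs with
    | (y :: g) :: gs => if key x = key y then (x :: y :: g) :: gs else [x] :: (y :: g) :: gs
    | gs => [x] :: gs

def convert_vector_to_events (vector : List Int) : List (Int × Int) :=
  let positive_indexes : List Int :=
    ((PySem.List.enumerate vector).filter (fun p => decide (p.2 > 0))).map (·.1)
  let events : List (Int × Int) :=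
    (pvGroupBy (fun ix => ix.1 - ix.2) (PySem.List.enumerate positive_indexes)).map
      (fun g => let cur_cut := g.map (·.2); (cur_cut.headD 0, cur_cut.getLastD 0))
  events.map (fun xy => (xy.1, xy.2 + 1))

-- ===== PORT B =====
def pvStep (st : List (Int × Int) × Bool × Int) (iv : Int × Int) : List (Int × Int) × Bool × Int :=
  if iv.2 > 0 then
    if !st.2.1 then (st.1, true, iv.1) else st
  else if st.2.1 then (st.1 ++ [(st.2.2, iv.1)], false, st.2.2)
  else st

def convert_vector_to_events_alt (vector : List Int) : List (Int × Int) :=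
  let st := (PySem.List.enumerate vector).foldl pvStep ([], false, 0)
  if st.2.1 then st.1 ++ [(st.2.2, (vector.length : Int))] else st.1

-- ===== PRECONDITION & SPEC =====
def Spec_convert_vector_to_events (vector : List Int) (out : List (Int × Int)) : Prop := out = convert_vector_to_events_alt vector
instance (vector : List Int) (out : List (Int × Int)) : Decidable (Spec_convert_vector_to_events vector out) := by unfold Spec_convert_vector_to_events; infer_instance

-- ===== CLAIM (what is proved, stated in full; the proofs are below) =====
def Claim_equal_convert_vector_to_events : Prop := ∀ (vector : List Int), Dom_convert_vector_to_events vector → Spec_convert_vector_to_events vector (convert_vector_to_events vector)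

-- ===== LEMMAS AND PROOFS =====

-- canonical run decomposition, the common reference of both proofs
mutual
def pvRuns (i : Int) : List Int → List (Int × Int)
  | [] => []
  | x :: xs => if x > 0 then pvIn i (i + 1) xs else pvRuns (i + 1) xs
def pvIn (s i : Int) : List Int → List (Int × Int)
  | [] => [(s, i)]
  | x :: xs => if x > 0 then pvIn s (i + 1) xs else (s, i) :: pvRuns (i + 1) xs
end

-- indices (from i) of the positive entries
def pvP (i : Int) : List Int → List Int
  | [] => []
  | x :: xs => if x > 0 then i :: pvP (i + 1) xs else pvP (i + 1) xs

-- grouping of a List Int into maximal runs of consecutive integers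
def pvGC : List Int → List (List Int)
  | [] => []
  | x :: xs =>
    match pvGC xs with
    | (y :: g) :: gs => if y = x + 1 then (x :: y :: g) :: gs else [x] :: (y :: g) :: gs
    | gs => [x] :: gs

def pvF (g : List Int) : Int × Int := (g.headD 0, g.getLastD 0 + 1)

def pvMergeHead (s i : Int) : List (List Int) → List (Int × Int)
  | (y :: g) :: gs =>
      if y = i then (s, (y :: g).getLastD 0 + 1) :: gs.map pvF
      else (s, i) :: ((y :: g) :: gs).map pvF
  | _ => [(s, i)]

-- groups with re-attached enumerate indices
def pvGE (e : Int) : List (List Int) → List (List (Int × Int))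
  | [] => []
  | g :: gs => PySem.List.enumerate g e :: pvGE (e + g.length) gs

theorem pvGC_flatten : ∀ q : List Int, (pvGC q).flatten = q := by
  intro q
  induction q with
  | nil => rfl
  | cons x xs ih =>
    simp only [pvGC]
    rcases h : pvGC xs with _ | ⟨g, gs⟩
    · simp [h] at ih; simp [ih]
    · rcases g with _ | ⟨y, g⟩
      · simp [h] at ih; simp [ih]
      · rw [h] at ih
        by_cases hy : y = x + 1
        · subst hy; simp; simpa using ih
        · simp [hy]; simpa using ih

theorem pvGC_ne_nil : ∀ (l : List Int), [] ∉ pvGC l := by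
  intro l
  induction l with
  | nil => simp [pvGC]
  | cons a as ih =>
    simp only [pvGC]
    rcases h : pvGC as with _ | ⟨g, gs⟩
    · simp
    · rcases g with _ | ⟨y, g⟩
      · exact absurd (by simp [h]) ih
      · rw [h] at ih
        by_cases hy : y = a + 1
        · subst hy; simp; simpa using ih
        · simp [hy]; simpa using ih

theorem pvP_lb : ∀ (l : List Int) (i x : Int), x ∈ pvP i l → i ≤ x := by
  intro l
  induction l with
  | nil => intro i x h; simp [pvP] at h
  | cons a as ih =>
    intro i x h
    simp only [pvP] at h
    by_cases ha : a > 0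
    · simp [ha] at h
      rcases h with h | h
      · omega
      · have := ih (i + 1) x h; omega
    · simp [ha] at h
      have := ih (i + 1) x h; omega

set_option maxRecDepth 4000 in
theorem pvGroupBy_enum : ∀ (q : List Int) (e : Int),
    pvGroupBy (fun ix => ix.1 - ix.2) (PySem.List.enumerate q e) = pvGE e (pvGC q) := by
  intro q
  induction q with
  | nil => intro e; simp [PySem.List.enumerate, pvGroupBy, pvGC, pvGE]
  | cons x xs ih =>
    intro e
    rw [PySem.List.enumerate_cons]
    simp only [pvGroupBy]
    rw [ih (e + 1)]
    simp only [pvGC]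
    rcases h : pvGC xs with _ | ⟨g, gs⟩
    · simp [pvGE, PySem.List.enumerate]
    · rcases g with _ | ⟨y, g⟩
      · exact absurd (by simp [h] : [] ∈ pvGC xs) (pvGC_ne_nil xs)
      · simp only [pvGE, PySem.List.enumerate_cons]
        by_cases hy : y = x + 1
        · subst hy
          have hk : (e : Int) - x = e + 1 - (x + 1) := by omega
          rw [if_pos hk, if_pos rfl]
          simp only [pvGE, PySem.List.enumerate_cons, List.length_cons]
          congr 2
          push_cast
          ring
        · have hk : ¬ ((e : Int) - x = e + 1 - y) := by omega
          rw [if_neg hk, if_neg hy]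
          simp only [pvGE, PySem.List.enumerate_cons, List.length_cons]
          congr 3

theorem pvRuns_gc : ∀ (l : List Int) (i : Int),
    pvRuns i l = (pvGC (pvP i l)).map pvF ∧
    ∀ s, pvIn s i l = pvMergeHead s i (pvGC (pvP i l)) := by
  intro l
  induction l with
  | nil => intro i; constructor <;> simp [pvRuns, pvIn, pvP, pvGC, pvMergeHead]
  | cons x xs ih =>
    intro i
    by_cases hx : x > 0
    · -- pvP i (x::xs) = i :: pvP (i+1) xs
      have hq : pvP i (x :: xs) = i :: pvP (i + 1) xs := by simp [pvP, hx]
      have key : (pvGC (i :: pvP (i + 1) xs)).map pvF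
          = pvMergeHead i (i + 1) (pvGC (pvP (i + 1) xs)) ∧
          ∀ s, pvMergeHead s i (pvGC (i :: pvP (i + 1) xs))
          = pvMergeHead s (i + 1) (pvGC (pvP (i + 1) xs)) := by
        simp only [pvGC]
        rcases h : pvGC (pvP (i + 1) xs) with _ | ⟨g, gs⟩
        · simp [pvMergeHead, pvF]
        · rcases g with _ | ⟨y, g⟩
          · exact absurd (by simp [h] : [] ∈ pvGC (pvP (i + 1) xs)) (pvGC_ne_nil _)
          · by_cases hy : y = i + 1
            · simp [hy, pvMergeHead, pvF]
            · simp [hy, pvMergeHead, pvF]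
      constructor
      · have h1 : pvRuns i (x :: xs) = pvIn i (i + 1) xs := by simp [pvRuns, hx]
        rw [h1, (ih (i + 1)).2 i, hq, key.1]
      · intro s
        have h1 : pvIn s i (x :: xs) = pvIn s (i + 1) xs := by simp [pvIn, hx]
        rw [h1, (ih (i + 1)).2 s, hq, key.2 s]
    · have hq : pvP i (x :: xs) = pvP (i + 1) xs := by simp [pvP, hx]
      constructor
      · have h1 : pvRuns i (x :: xs) = pvRuns (i + 1) xs := by simp [pvRuns, hx]
        rw [h1, (ih (i + 1)).1, hq]
      · intro s
        have h1 : pvIn s i (x :: xs) = (s, i) :: pvRuns (i + 1) xs := by simp [pvIn, hx]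
        rw [h1, (ih (i + 1)).1, hq]
        rcases h : pvGC (pvP (i + 1) xs) with _ | ⟨g, gs⟩
        · simp [pvMergeHead]
        · rcases g with _ | ⟨y, g⟩
          · exact absurd (by simp [h] : [] ∈ pvGC (pvP (i + 1) xs)) (pvGC_ne_nil _)
          · have hy : y ∈ pvP (i + 1) xs := by
              have := pvGC_flatten (pvP (i + 1) xs)
              rw [h] at this
              rw [← this]; simp
            have : i + 1 ≤ y := pvP_lb _ _ _ hy
            have hne : ¬ (y = i) := by omega
            simp [pvMergeHead, hne, pvF]

-- A's pipeline equals map pvF over the consecutive grouping of the positive indices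
theorem pvA_eq : ∀ (v : List Int), convert_vector_to_events v = (pvGC (pvP 0 v)).map pvF := by
  intro v
  have hpos : ((PySem.List.enumerate v).filter (fun p => decide (p.2 > 0))).map (·.1) = pvP 0 v := by
    have : ∀ (l : List Int) (e : Int),
        ((PySem.List.enumerate l e).filter (fun p => decide (p.2 > 0))).map (·.1) = pvP e l := by
      intro l
      induction l with
      | nil => intro e; simp [PySem.List.enumerate, pvP]
      | cons a as ih =>
        intro e
        rw [PySem.List.enumerate_cons]
        by_cases ha : a > 0 <;> simp [pvP, ha, ih (e + 1)]
    exact this v 0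
  unfold convert_vector_to_events
  simp only [hpos, pvGroupBy_enum]
  -- now: (pvGE 0 (pvGC q)).map (...) then map (+1) = (pvGC q).map pvF
  generalize pvGC (pvP 0 v) = gs
  have : ∀ (gs : List (List Int)) (e : Int),
      ((pvGE e gs).map (fun g => let cur_cut := g.map (·.2); (cur_cut.headD 0, cur_cut.getLastD 0))).map
        (fun xy => (xy.1, xy.2 + 1)) = gs.map pvF := by
    intro gs
    induction gs with
    | nil => intro e; simp [pvGE]
    | cons g gs ih =>
      intro e
      simp only [pvGE, List.map_cons]
      rw [ih (e + g.length)]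
      simp [pvF, PySem.List.map_snd_enumerate]
  exact this gs 0

-- B's fold equals pvRuns / pvIn depending on the flag
def pvFinish (n : Int) (st : List (Int × Int) × Bool × Int) : List (Int × Int) :=
  if st.2.1 then st.1 ++ [(st.2.2, n)] else st.1

theorem pvB_fold : ∀ (l : List Int) (i : Int) (acc : List (Int × Int)) (s : Int),
    (pvFinish (i + l.length) ((PySem.List.enumerate l i).foldl pvStep (acc, false, s)) = acc ++ pvRuns i l) ∧
    (pvFinish (i + l.length) ((PySem.List.enumerate l i).foldl pvStep (acc, true, s)) = acc ++ pvIn s i l) := by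
  intro l
  induction l with
  | nil =>
    intro i acc s
    constructor <;> simp [PySem.List.enumerate, pvFinish, pvRuns, pvIn]
  | cons x xs ih =>
    intro i acc s
    have hlen : (i + (x :: xs).length : Int) = (i + 1) + xs.length := by simp; omega
    constructor
    · rw [PySem.List.enumerate_cons, List.foldl_cons, hlen]
      by_cases hx : x > 0
      · have : pvStep (acc, false, s) (i, x) = (acc, true, i) := by simp [pvStep, hx]
        rw [this, (ih (i + 1) acc i).2]
        simp [pvRuns, hx]
      · have : pvStep (acc, false, s) (i, x) = (acc, false, s) := by simp [pvStep, hx]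
        rw [this, (ih (i + 1) acc s).1]
        simp [pvRuns, hx]
    · rw [PySem.List.enumerate_cons, List.foldl_cons, hlen]
      by_cases hx : x > 0
      · have : pvStep (acc, true, s) (i, x) = (acc, true, s) := by simp [pvStep, hx]
        rw [this, (ih (i + 1) acc s).2]
        simp [pvIn, hx]
      · have : pvStep (acc, true, s) (i, x) = (acc ++ [(s, i)], false, s) := by simp [pvStep, hx]
        rw [this, (ih (i + 1) (acc ++ [(s, i)]) s).1]
        simp [pvIn, hx]

theorem pvB_eq : ∀ (v : List Int), convert_vector_to_events_alt v = pvRuns 0 v := by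
  intro v
  have := (pvB_fold v 0 [] 0).1
  simp only [List.nil_append] at this
  unfold convert_vector_to_events_alt
  rw [← this]
  simp [pvFinish]

-- ===== VERDICT (by name: the statement is the Claim_ definition above) =====
theorem convert_vector_to_events_spec : Claim_equal_convert_vector_to_events := by
  intro v _
  unfold Spec_convert_vector_to_events
  rw [pvA_eq, pvB_eq, (pvRuns_gc v 0).1]
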